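-- pv_equiv track=rewrite | github.com/albhasan/modis2scidb | run.py | buildBinaryFilePath
-- ===== SOURCE A (Python) =====
-- def buildBinaryFilePath(basebfilepath, hRange, vRange, date, prod):
-- 	'''Returns a name for a binary file made of a set of tiles'''
-- 	tmpfn = 0
-- 	for i in hRange:
-- 		for j in vRange:
-- 			tmpfn = tmpfn + i + j
-- 	binaryFilename = 'load_' + prod + str(tmpfn) + str(date) + '.sdbbin'
-- 	res = basebfilepath + binaryFilename
-- 	return res
-- ===== SOURCE B (Python) =====
-- def _len_and_sum(xs):
--     '''One pass returning (length, sum) of xs.'''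
--     n = 0
--     s = 0
--     for x in xs:
--         n += 1
--         s += x
--     return (n, s)
--
-- def buildBinaryFilePath(basebfilepath, hRange, vRange, date, prod):
--     '''Returns a name for a binary file made of a set of tiles'''
--     nh, sh = _len_and_sum(hRange)
--     nv, sv = _len_and_sum(vRange)
--     tmpfn = nv * sh + nh * sv
--     return ''.join([basebfilepath, 'load_', prod, str(tmpfn), str(date), '.sdbbin'])
-- ===== Notes on version B (the rewrite author's own statement) =====
-- stated objective: faster
-- what changed: Replaces the O(|h|*|v|) nested accumulation loop with one recursive (length,sum) pass per list and the closed form len(v)*sum(h)+len(h)*sum(v), assembling the name with ''.join of the parts.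
import Mathlib
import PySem

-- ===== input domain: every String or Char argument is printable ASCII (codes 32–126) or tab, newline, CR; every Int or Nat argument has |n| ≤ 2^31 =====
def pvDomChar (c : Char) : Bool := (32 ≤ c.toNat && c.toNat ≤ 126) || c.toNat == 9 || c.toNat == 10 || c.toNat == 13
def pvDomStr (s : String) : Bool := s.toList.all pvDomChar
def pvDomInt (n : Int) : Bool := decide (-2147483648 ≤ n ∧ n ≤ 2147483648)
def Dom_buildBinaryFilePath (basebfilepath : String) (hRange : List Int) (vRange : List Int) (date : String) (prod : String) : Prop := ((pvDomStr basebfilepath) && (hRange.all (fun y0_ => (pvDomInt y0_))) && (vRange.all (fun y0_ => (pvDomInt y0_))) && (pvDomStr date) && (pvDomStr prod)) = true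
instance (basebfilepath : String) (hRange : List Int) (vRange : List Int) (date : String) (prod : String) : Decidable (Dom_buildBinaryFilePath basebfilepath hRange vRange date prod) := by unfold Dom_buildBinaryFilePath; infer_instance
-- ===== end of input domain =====

-- B replaces A's O(|h|*|v|) nested accumulation with one (length,sum) pass per list and the
-- closed form len(v)*sum(h)+len(h)*sum(v), joining the name parts at the end (objective: faster).

-- ===== PORT A =====
def buildBinaryFilePath (basebfilepath : String) (hRange : List Int) (vRange : List Int) (date : String) (prod : String) : String :=
  let tmpfn : Int := hRange.foldl (fun acc i => vRange.foldl (fun a j => a + i + j) acc) 0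
  let binaryFilename := "load_" ++ prod ++ PySem.Int.toStr tmpfn ++ date ++ ".sdbbin"
  let res := basebfilepath ++ binaryFilename
  res

-- ===== PORT B =====
-- one pass returning (length, sum) of xs
def pvLenAndSum (xs : List Int) : Int × Int :=
  xs.foldl (fun (p : Int × Int) x => (p.1 + 1, p.2 + x)) (0, 0)

def buildBinaryFilePath_alt (basebfilepath : String) (hRange : List Int) (vRange : List Int) (date : String) (prod : String) : String :=
  let hp := pvLenAndSum hRange
  let vp := pvLenAndSum vRange
  let tmpfn : Int := vp.1 * hp.2 + hp.1 * vp.2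
  String.join [basebfilepath, "load_", prod, PySem.Int.toStr tmpfn, date, ".sdbbin"]

-- ===== PRECONDITION & SPEC =====
def Spec_buildBinaryFilePath (basebfilepath : String) (hRange : List Int) (vRange : List Int) (date : String) (prod : String) (out : String) : Prop := out = buildBinaryFilePath_alt basebfilepath hRange vRange date prod
instance (basebfilepath : String) (hRange : List Int) (vRange : List Int) (date : String) (prod : String) (out : String) : Decidable (Spec_buildBinaryFilePath basebfilepath hRange vRange date prod out) := by unfold Spec_buildBinaryFilePath; infer_instance

-- ===== CLAIM (what is proved, stated in full; the proofs are below) =====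
def Claim_equal_buildBinaryFilePath : Prop := ∀ (basebfilepath : String) (hRange : List Int) (vRange : List Int) (date : String) (prod : String), Dom_buildBinaryFilePath basebfilepath hRange vRange date prod → Spec_buildBinaryFilePath basebfilepath hRange vRange date prod (buildBinaryFilePath basebfilepath hRange vRange date prod)

-- ===== LEMMAS AND PROOFS =====
theorem pv_lenAndSum (xs : List Int) : pvLenAndSum xs = ((xs.length : Int), xs.sum) := by
  unfold pvLenAndSum
  induction xs using List.reverseRecOn with
  | nil => simp
  | append_singleton ys y ih => simp [List.foldl_append, ih]

theorem pv_inner (v : List Int) (i acc : Int) :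
    v.foldl (fun a j => a + i + j) acc = acc + (v.length : Int) * i + v.sum := by
  induction v generalizing acc with
  | nil => simp
  | cons x xs ih => rw [List.foldl_cons, ih]; simp [List.length_cons, List.sum_cons]; ring

theorem pv_outer (h v : List Int) (acc : Int) :
    h.foldl (fun acc i => v.foldl (fun a j => a + i + j) acc) acc
      = acc + (v.length : Int) * h.sum + (h.length : Int) * v.sum := by
  induction h generalizing acc with
  | nil => simp
  | cons x xs ih => rw [List.foldl_cons, pv_inner, ih]; simp [List.length_cons, List.sum_cons]; ring

-- ===== VERDICT (by name: the statement is the Claim_ definition above) =====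
theorem buildBinaryFilePath_spec : Claim_equal_buildBinaryFilePath := by
  intro b h v d p _
  unfold Spec_buildBinaryFilePath buildBinaryFilePath buildBinaryFilePath_alt
  simp [pv_outer, pv_lenAndSum, String.join, String.append_assoc]
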